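-- pv_equiv track=rewrite | github.com/luanzeba/dotfiles | chromium/migrate-arc-spaces.py | find_arc_space
-- ===== SOURCE A (Python) =====
-- from typing import Any
--
-- def find_arc_space(
--     spaces_by_id: dict[str, dict[str, Any]],
--     wanted_title: str,
--     fallback_titles: list[str] | None = None,
-- ) -> tuple[str, dict[str, Any]] | None:
--     fallback_titles = fallback_titles or []
--     wanted_lc = wanted_title.lower()
--
--     for sid, space in spaces_by_id.items():
--         if str(space.get("title", "")).lower() == wanted_lc:
--             return sid, space
--
--     for fallback in fallback_titles:
--         fallback_lc = fallback.lower()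
--         for sid, space in spaces_by_id.items():
--             if str(space.get("title", "")).lower() == fallback_lc:
--                 return sid, space
--
--     return None
-- ===== SOURCE B (Python) =====
-- def find_arc_space(spaces_by_id, wanted_title, fallback_titles=None):
--     # Rank table: wanted title gets rank 0, each fallback rank i+1; first occurrence wins.
--     ranks = {}
--     i = 0
--     for t in [wanted_title] + list(fallback_titles or []):
--         ranks.setdefault(t.lower(), i)
--         i += 1
--     best = None
--     for sid, space in spaces_by_id.items():
--         r = ranks.get(str(space.get("title", "")).lower())
--         if r is not None and (best is None or r < best[0]):
--             best = (r, sid, space)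
--     return (best[1], best[2]) if best is not None else None
-- ===== Notes on version B (the rewrite author's own statement) =====
-- stated objective: faster
-- what changed: Replaces A's rescan of all spaces once per fallback title with a rank table (title -> priority, first occurrence wins) and a single pass over the spaces keeping the strictly-smallest-ranked, earliest space.
import Mathlib
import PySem

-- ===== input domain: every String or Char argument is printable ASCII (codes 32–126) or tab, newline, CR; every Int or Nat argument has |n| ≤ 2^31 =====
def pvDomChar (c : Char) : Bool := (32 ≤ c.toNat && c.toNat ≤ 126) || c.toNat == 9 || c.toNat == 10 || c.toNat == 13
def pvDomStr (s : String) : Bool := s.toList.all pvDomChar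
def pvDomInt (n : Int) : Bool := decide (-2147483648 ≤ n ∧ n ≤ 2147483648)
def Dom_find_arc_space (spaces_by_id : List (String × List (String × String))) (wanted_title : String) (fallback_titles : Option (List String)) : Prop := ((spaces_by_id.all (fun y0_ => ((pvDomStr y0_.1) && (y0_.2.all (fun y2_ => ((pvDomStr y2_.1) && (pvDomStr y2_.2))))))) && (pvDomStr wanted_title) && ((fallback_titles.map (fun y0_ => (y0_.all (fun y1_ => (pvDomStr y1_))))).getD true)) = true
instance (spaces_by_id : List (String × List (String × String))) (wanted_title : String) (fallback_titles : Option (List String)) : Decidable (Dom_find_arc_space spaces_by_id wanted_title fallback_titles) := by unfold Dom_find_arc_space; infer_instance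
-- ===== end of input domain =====

-- B replaces A's rescan of the spaces per fallback title with a rank table and one pass (faster: asymptotic).
-- ===== PORT A =====
-- str(space.get("title","")).lower(): values are strings, so str() is the identity
def pvKeyOf (space : List (String × String)) : String :=
  PySem.Str.lower (PySem.Dict.getD (PySem.Dict.mk space) "title" "")

-- the inner 'for sid, space in spaces_by_id.items(): if … return'
def pvFindSpace (spaces : List (String × List (String × String))) (tlc : String) :
    Option (String × List (String × String)) :=
  match spaces with
  | [] => none
  | (sid, space) :: rest =>
    if pvKeyOf space = tlc then some (sid, space) else pvFindSpace rest tlc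

-- the 'for fallback in fallback_titles' loop
def pvLoopFallbacks (fbs : List String) (spaces : List (String × List (String × String))) :
    Option (String × List (String × String)) :=
  match fbs with
  | [] => none
  | fb :: rest =>
    match pvFindSpace spaces (PySem.Str.lower fb) with
    | some r => some r
    | none => pvLoopFallbacks rest spaces

def find_arc_space (spaces_by_id : List (String × List (String × String))) (wanted_title : String) (fallback_titles : Option (List String)) : Option (String × (List (String × String))) :=
  let fbs := match fallback_titles with | none => [] | some l => l   -- 'fallback_titles or []'
  let wanted_lc := PySem.Str.lower wanted_title
  match pvFindSpace spaces_by_id wanted_lc with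
  | some r => some r
  | none => pvLoopFallbacks fbs spaces_by_id

-- ===== PORT B =====
-- 'for t in titles: ranks.setdefault(t.lower(), i); i += 1'
def pvBuildRanks (d : PySem.Dict String Nat) (i : Nat) (titles : List String) :
    PySem.Dict String Nat :=
  match titles with
  | [] => d
  | t :: ts =>
    match d.get? (PySem.Str.lower t) with
    | some _ => pvBuildRanks d (i + 1) ts
    | none => pvBuildRanks (d.insert (PySem.Str.lower t) i) (i + 1) ts

-- the single pass keeping the strictly smallest rank (= B's second loop)
def pvBestStep (ranks : PySem.Dict String Nat)
    (best : Option (Nat × String × List (String × String)))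
    (p : String × List (String × String)) :
    Option (Nat × String × List (String × String)) :=
  match ranks.get? (pvKeyOf p.2) with
  | none => best
  | some r =>
    match best with
    | none => some (r, p.1, p.2)
    | some (r0, _, _) => if r < r0 then some (r, p.1, p.2) else best

def find_arc_space_alt (spaces_by_id : List (String × List (String × String))) (wanted_title : String) (fallback_titles : Option (List String)) : Option (String × (List (String × String))) :=
  let titles := wanted_title :: (match fallback_titles with | none => [] | some l => l)
  let ranks := pvBuildRanks PySem.Dict.empty 0 titles
  let best := spaces_by_id.foldl (pvBestStep ranks) none
  match best with
  | none => none
  | some (_, sid, space) => some (sid, space)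

-- ===== PRECONDITION & SPEC =====
def Spec_find_arc_space (spaces_by_id : List (String × List (String × String))) (wanted_title : String) (fallback_titles : Option (List String)) (out : Option (String × (List (String × String)))) : Prop := out = find_arc_space_alt spaces_by_id wanted_title fallback_titles
instance (spaces_by_id : List (String × List (String × String))) (wanted_title : String) (fallback_titles : Option (List String)) (out : Option (String × (List (String × String)))) : Decidable (Spec_find_arc_space spaces_by_id wanted_title fallback_titles out) := by unfold Spec_find_arc_space; infer_instance

-- ===== CLAIM (what is proved, stated in full; the proofs are below) =====
def Claim_equal_find_arc_space : Prop := ∀ (spaces_by_id : List (String × List (String × String))) (wanted_title : String) (fallback_titles : Option (List String)), Dom_find_arc_space spaces_by_id wanted_title fallback_titles → Spec_find_arc_space spaces_by_id wanted_title fallback_titles (find_arc_space spaces_by_id wanted_title fallback_titles)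

-- ===== LEMMAS AND PROOFS =====

-- rank of a (lowered) key in a title list: index of first match
def pvRankFn (titles : List String) (k : String) : Option Nat :=
  match titles with
  | [] => none
  | t :: ts =>
    if PySem.Str.lower t = k then some 0 else (pvRankFn ts k).map (· + 1)

-- A's whole search as one sequence of scans
def pvSeq (titles : List String) (spaces : List (String × List (String × String))) :
    Option (String × List (String × String)) :=
  match titles with
  | [] => none
  | t :: ts =>
    match pvFindSpace spaces (PySem.Str.lower t) with
    | some r => some r
    | none => pvSeq ts spaces

theorem pvBuildRanks_get? (titles : List String) (d : PySem.Dict String Nat) (i : Nat)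
    (k : String) :
    (pvBuildRanks d i titles).get? k = (d.get? k).or ((pvRankFn titles k).map (· + i)) := by
  induction titles generalizing d i with
  | nil => simp [pvBuildRanks, pvRankFn]
  | cons t ts ih =>
    simp only [pvBuildRanks, pvRankFn]
    by_cases hk : PySem.Str.lower t = k
    · subst hk
      cases hd : d.get? (PySem.Str.lower t) with
      | some v => simp [hd, ih, Option.or]
      | none =>
        rw [ih]
        simp [PySem.Dict.get?_insert_self, Option.or]
    · cases hd : d.get? (PySem.Str.lower t) with
      | some v =>
        rw [ih]
        simp only [if_neg hk]
        cases hdk : d.get? k <;> cases hr : pvRankFn ts k <;>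
          simp [Option.or] <;> omega
      | none =>
        rw [ih]
        rw [PySem.Dict.get?_insert_of_ne d i (Ne.symm hk)]
        simp only [if_neg hk]
        cases hdk : d.get? k <;> cases hr : pvRankFn ts k <;>
          simp [Option.or] <;> omega

theorem pvFindSpace_none (spaces : List (String × List (String × String))) (tlc : String)
    (h : pvFindSpace spaces tlc = none) :
    ∀ p ∈ spaces, pvKeyOf p.2 ≠ tlc := by
  induction spaces with
  | nil => simp
  | cons p rest ih =>
    intro q hq
    simp only [pvFindSpace] at h
    split at h
    · exact absurd h (by simp)
    · rcases List.mem_cons.mp hq with rfl | hq'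
      · assumption
      · exact ih h q hq'

-- once the accumulator holds rank 0, it never changes
theorem pvFold_zero_fixed (ranks : PySem.Dict String Nat)
    (spaces : List (String × List (String × String))) (sid : String)
    (sp : List (String × String)) :
    spaces.foldl (pvBestStep ranks) (some (0, sid, sp)) = some (0, sid, sp) := by
  induction spaces with
  | nil => rfl
  | cons p rest ih =>
    simp only [List.foldl_cons]
    have : pvBestStep ranks (some (0, sid, sp)) p = some (0, sid, sp) := by
      simp only [pvBestStep]
      cases ranks.get? (pvKeyOf p.2) <;> simp
    rw [this, ih]

-- if some space matches tlc and ranks sends exactly tlc to 0, the fold finds the first such space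
theorem pvFold_zero_found (ranks : PySem.Dict String Nat) (tlc : String)
    (hr : ∀ k, ranks.get? k = some 0 ↔ k = tlc)
    (spaces : List (String × List (String × String)))
    (acc : Option (Nat × String × List (String × String)))
    (hacc : acc = none ∨ ∃ r0 s0 p0, acc = some (r0, s0, p0) ∧ 0 < r0)
    (res : String × List (String × String))
    (hf : pvFindSpace spaces tlc = some res) :
    spaces.foldl (pvBestStep ranks) acc = some (0, res.1, res.2) := by
  induction spaces generalizing acc with
  | nil => simp [pvFindSpace] at hf
  | cons p rest ih =>
    obtain ⟨sid0, sp0⟩ := p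
    simp only [pvFindSpace] at hf
    simp only [List.foldl_cons]
    by_cases hk : pvKeyOf sp0 = tlc
    · rw [if_pos hk] at hf
      injection hf with hf; subst hf
      have hget : ranks.get? (pvKeyOf sp0) = some 0 := (hr _).mpr hk
      have : pvBestStep ranks acc (sid0, sp0) = some (0, sid0, sp0) := by
        simp only [pvBestStep]
        rcases hacc with rfl | ⟨r0, s0, p0, rfl, hpos⟩
        · simp [hget]
        · simp [hget, hpos]
      rw [this]
      exact pvFold_zero_fixed ranks rest sid0 sp0
    · rw [if_neg hk] at hf
      apply ih _ _ hf
      simp only [pvBestStep]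
      cases hg : ranks.get? (pvKeyOf sp0) with
      | none => exact hacc
      | some r =>
        have hrpos : 0 < r := by
          rcases Nat.eq_zero_or_pos r with rfl | h
          · exact absurd ((hr _).mp hg) hk
          · exact h
        rcases hacc with rfl | ⟨r0, s0, p0, rfl, hpos⟩
        · right; exact ⟨r, sid0, sp0, rfl, hrpos⟩
        · by_cases hlt : r < r0
          · right; exact ⟨r, sid0, sp0, by simp [hlt], hrpos⟩
          · right; exact ⟨r0, s0, p0, by simp [hlt], hpos⟩

def pvShift (x : Option (Nat × String × List (String × String))) :
    Option (Nat × String × List (String × String)) :=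
  x.map (fun q => (q.1 + 1, q.2))

-- shifting every rank by one commutes with the fold
theorem pvFold_shift (r1 r2 : PySem.Dict String Nat)
    (spaces : List (String × List (String × String)))
    (hr : ∀ p : String × List (String × String), p ∈ spaces →
      r1.get? (pvKeyOf p.2) = (r2.get? (pvKeyOf p.2)).map (· + 1))
    (acc : Option (Nat × String × List (String × String))) :
    spaces.foldl (pvBestStep r1) (pvShift acc) =
      pvShift (spaces.foldl (pvBestStep r2) acc) := by
  induction spaces generalizing acc with
  | nil => rfl
  | cons p rest ih =>
    simp only [List.foldl_cons]
    rw [show pvBestStep r1 (pvShift acc) p = pvShift (pvBestStep r2 acc p) from ?_, ih]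
    · intro q hq; exact hr q (List.mem_cons_of_mem _ hq)
    · simp only [pvBestStep, hr p (List.mem_cons_self)]
      cases hg : r2.get? (pvKeyOf p.2) with
      | none => simp
      | some r =>
        simp only [Option.map_some]
        rcases acc with _ | ⟨r0, s0, p0⟩
        · simp [pvShift]
        · simp only [pvShift, Option.map_some]
          by_cases hlt : r < r0 <;> simp [hlt, Nat.add_lt_add_iff_right]

-- main: A's sequential search equals B's single min-rank pass
theorem pvMain (titles : List String) (spaces : List (String × List (String × String)))
    (ranks : PySem.Dict String Nat)
    (hrk : ∀ k, ranks.get? k = pvRankFn titles k) :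
    pvSeq titles spaces =
      (spaces.foldl (pvBestStep ranks) none).map (fun q => (q.2.1, q.2.2)) := by
  induction titles generalizing spaces ranks with
  | nil =>
    have : spaces.foldl (pvBestStep ranks) none = none := by
      induction spaces with
      | nil => rfl
      | cons p rest ih2 =>
        simp only [List.foldl_cons, pvBestStep, hrk, pvRankFn]
        exact ih2
    simp [pvSeq, this]
  | cons t ts ih =>
    simp only [pvSeq]
    cases hf : pvFindSpace spaces (PySem.Str.lower t) with
    | some res =>
      have hr0 : ∀ k, ranks.get? k = some 0 ↔ k = PySem.Str.lower t := by
        intro k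
        rw [hrk]
        simp only [pvRankFn]
        by_cases hk : PySem.Str.lower t = k
        · simp [hk]
        · cases h2 : pvRankFn ts k <;> simp [hk] <;> exact fun h => (Ne.symm hk) h
      rw [pvFold_zero_found ranks (PySem.Str.lower t) hr0 spaces none (Or.inl rfl) res hf]
      simp
    | none =>
      have hne := pvFindSpace_none spaces (PySem.Str.lower t) hf
      have h2 : ∀ k, (pvBuildRanks PySem.Dict.empty 0 ts).get? k = pvRankFn ts k := by
        intro k
        rw [pvBuildRanks_get?]
        cases pvRankFn ts k <;> simp [Option.or, PySem.Dict.empty, PySem.Dict.get?]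
      have hshift := pvFold_shift ranks (pvBuildRanks PySem.Dict.empty 0 ts) spaces
        (by
          intro p hp
          rw [hrk, h2]
          simp only [pvRankFn]
          rw [if_neg (fun h => (hne p hp) h.symm)])
        none
      rw [show (none : Option (Nat × String × List (String × String))) = pvShift none from rfl,
        hshift, ih spaces _ h2]
      cases spaces.foldl (pvBestStep (pvBuildRanks PySem.Dict.empty 0 ts)) none <;>
        simp [pvShift]

theorem pvLoop_eq_seq (fbs : List String) (spaces : List (String × List (String × String))) :
    pvLoopFallbacks fbs spaces = pvSeq fbs spaces := by
  induction fbs with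
  | nil => rfl
  | cons fb rest ih =>
    simp only [pvLoopFallbacks, pvSeq]
    cases pvFindSpace spaces (PySem.Str.lower fb) <;> simp [ih]

theorem pvBridge (spaces : List (String × List (String × String))) (wanted : String)
    (L : List String) :
    (match pvFindSpace spaces (PySem.Str.lower wanted) with
      | some r => some r
      | none => pvLoopFallbacks L spaces) =
    (match spaces.foldl (pvBestStep (pvBuildRanks PySem.Dict.empty 0 (wanted :: L))) none with
      | none => none
      | some (_, sid, space) => some (sid, space)) := by
  have hrk : ∀ k, (pvBuildRanks PySem.Dict.empty 0 (wanted :: L)).get? k =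
      pvRankFn (wanted :: L) k := by
    intro k
    rw [pvBuildRanks_get?]
    cases pvRankFn (wanted :: L) k <;> simp [Option.or, PySem.Dict.empty, PySem.Dict.get?]
  have hL : (match pvFindSpace spaces (PySem.Str.lower wanted) with
      | some r => some r
      | none => pvLoopFallbacks L spaces) = pvSeq (wanted :: L) spaces := by
    simp only [pvSeq, pvLoop_eq_seq]
  rw [hL, pvMain _ spaces _ hrk]
  cases spaces.foldl (pvBestStep (pvBuildRanks PySem.Dict.empty 0 (wanted :: L))) none <;> simp

-- ===== VERDICT (by name) =====
theorem find_arc_space_spec : Claim_equal_find_arc_space := by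
  intro spaces wanted fbs? _
  unfold Spec_find_arc_space
  cases fbs? with
  | none => exact pvBridge spaces wanted []
  | some l => exact pvBridge spaces wanted l
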